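-- pv_equiv track=rewrite | github.com/lemontheme/trefwurd | scripts/experiments/bpe_experiment.py | counts_delta
-- ===== SOURCE A (Python) =====
-- from operator import neg
--
-- def counts_delta(old_counts, new_counts):
--     delta = {}
--     for count_key in old_counts.keys() | new_counts.keys():
--         old_count = old_counts.get(count_key)
--         new_count = new_counts.get(count_key)
--         if old_count is None:
--             delta[count_key] = new_counts[count_key]
--         elif new_count is None:
--             delta[count_key] = neg(old_count)
--         else:
--             delta[count_key] = new_count - old_count
--     return delta
-- ===== SOURCE B (Python) =====
-- def counts_delta(old_counts, new_counts):
--     delta = {k: -v for k, v in old_counts.items()}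
--     for k, v in new_counts.items():
--         delta[k] = delta.get(k, 0) + v
--     return delta
-- ===== Notes on version B (the rewrite author's own statement) =====
-- stated objective: simpler
-- what changed: Instead of one pass over the key union with is-None branching on both lookups, B makes two accumulating passes over a running dict: it negates all old counts, then adds each new count with get(k, 0).
import Mathlib
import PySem

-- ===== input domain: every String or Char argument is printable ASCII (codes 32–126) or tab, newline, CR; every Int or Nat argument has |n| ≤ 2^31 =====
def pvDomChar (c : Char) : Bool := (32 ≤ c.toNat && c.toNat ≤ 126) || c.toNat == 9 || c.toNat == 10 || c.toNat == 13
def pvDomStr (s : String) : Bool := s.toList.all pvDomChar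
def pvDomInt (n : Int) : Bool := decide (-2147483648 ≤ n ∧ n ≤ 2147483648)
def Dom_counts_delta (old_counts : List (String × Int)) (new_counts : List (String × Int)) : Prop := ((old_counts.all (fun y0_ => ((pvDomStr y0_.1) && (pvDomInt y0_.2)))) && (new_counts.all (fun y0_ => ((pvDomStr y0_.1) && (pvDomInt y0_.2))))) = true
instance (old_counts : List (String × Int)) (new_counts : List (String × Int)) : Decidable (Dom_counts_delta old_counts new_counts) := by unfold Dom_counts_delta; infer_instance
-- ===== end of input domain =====

-- B replaces A's single union-keyed pass (with is-None branching) by two accumulating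
-- passes over a running dict: negate old counts, then add new counts via get(k, 0); simpler.


-- ===== PORT A =====
-- one loop body of A: the three if/elif/else branches, each doing delta[count_key] = …
-- (the 'old is None' branch reads new_counts[count_key]; getD is exact there, since that
-- key came from the key union and is absent from old_counts, hence present in new_counts)
def countsDeltaStepA (od nd : PySem.Dict String Int)
    (d : PySem.Dict String Int) (k : String) : PySem.Dict String Int :=
  match od.get? k, nd.get? k with
  | none, _ => d.insert k (nd.getD k 0)
  | some oc, none => d.insert k (-oc)
  | some oc, some nc => d.insert k (nc - oc)

def counts_delta (old_counts : List (String × Int)) (new_counts : List (String × Int)) : List (String × Int) :=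
  let od : PySem.Dict String Int := ⟨old_counts⟩
  let nd : PySem.Dict String Int := ⟨new_counts⟩
  let keys := PySem.Set.union (PySem.Set.ofList od.keys) nd.keys
  (keys.foldl (countsDeltaStepA od nd) PySem.Dict.empty).items

-- ===== PORT B =====
def counts_delta_alt (old_counts : List (String × Int)) (new_counts : List (String × Int)) : List (String × Int) :=
  let delta0 : PySem.Dict String Int :=
    old_counts.foldl (fun d p => d.insert p.1 (-p.2)) PySem.Dict.empty
  (new_counts.foldl (fun d p => d.insert p.1 (d.getD p.1 0 + p.2)) delta0).items

-- ===== PRECONDITION & SPEC =====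
-- Pre_ requires each association list to have distinct keys: the Python arguments are
-- dicts, so an assoc list with a duplicated key does not denote any input of Python A.
def Pre_counts_delta (old_counts : List (String × Int)) (new_counts : List (String × Int)) : Prop :=
  (old_counts.map Prod.fst).Nodup ∧ (new_counts.map Prod.fst).Nodup
instance (old_counts : List (String × Int)) (new_counts : List (String × Int)) : Decidable (Pre_counts_delta old_counts new_counts) := by unfold Pre_counts_delta; infer_instance

def pvWitness_counts_delta : (List (String × Int)) × (List (String × Int)) :=
  ([("a", 2), ("b", 3)], [("b", 5), ("c", 1)])

def Spec_counts_delta (old_counts : List (String × Int)) (new_counts : List (String × Int)) (out : List (String × Int)) : Prop := out = counts_delta_alt old_counts new_counts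
instance (old_counts : List (String × Int)) (new_counts : List (String × Int)) (out : List (String × Int)) : Decidable (Spec_counts_delta old_counts new_counts out) := by unfold Spec_counts_delta; infer_instance

-- ===== CLAIM (what is proved, stated in full; the proofs are below) =====
def Claim_equal_counts_delta : Prop := ∀ (old_counts : List (String × Int)) (new_counts : List (String × Int)), Dom_counts_delta old_counts new_counts → Pre_counts_delta old_counts new_counts → Spec_counts_delta old_counts new_counts (counts_delta old_counts new_counts)

-- ===== LEMMAS AND PROOFS =====

-- the value A assigns for key k
def valA (od nd : PySem.Dict String Int) (k : String) : Int :=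
  match od.get? k, nd.get? k with
  | none, _ => nd.getD k 0
  | some oc, none => -oc
  | some oc, some nc => nc - oc

theorem stepA_eq_insert (od nd : PySem.Dict String Int) (d : PySem.Dict String Int) (k : String) :
    countsDeltaStepA od nd d k = d.insert k (valA od nd k) := by
  unfold countsDeltaStepA valA
  rcases od.get? k with _ | oc <;> rcases nd.get? k with _ | nc <;> rfl

-- B's first pass: lookup in the negated-old dict (distinct keys)
theorem get?_foldl_neg (l : List (String × Int)) (d : PySem.Dict String Int) (k : String)
    (h : (l.map Prod.fst).Nodup) :
    (l.foldl (fun d p => d.insert p.1 (-p.2)) d).get? k =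
      if k ∈ l.map Prod.fst then ((PySem.Dict.mk l).get? k).map (fun v => -v) else d.get? k := by
  induction l generalizing d with
  | nil => simp
  | cons a t ih =>
    obtain ⟨ak, av⟩ := a
    simp only [List.map_cons, List.nodup_cons] at h
    simp only [List.foldl_cons, ih _ h.2, List.map_cons, List.mem_cons]
    by_cases hk : k = ak
    · subst hk
      simp [h.1, PySem.Dict.get?_mk_cons]
    · have hne : ak ≠ k := fun h' => hk h'.symm
      by_cases hm : k ∈ t.map Prod.fst
      · simp [hk, hm, PySem.Dict.get?_mk_cons, hne]
      · simp [hk, hm, PySem.Dict.get?_insert]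

-- B's second pass: lookup after accumulating the new counts (distinct keys)
theorem get?_foldl_acc (l : List (String × Int)) (d : PySem.Dict String Int) (k : String)
    (h : (l.map Prod.fst).Nodup) :
    (l.foldl (fun d p => d.insert p.1 (d.getD p.1 0 + p.2)) d).get? k =
      if k ∈ l.map Prod.fst then some (d.getD k 0 + (PySem.Dict.mk l).getD k 0) else d.get? k := by
  induction l generalizing d with
  | nil => simp
  | cons a t ih =>
    obtain ⟨ak, av⟩ := a
    simp only [List.map_cons, List.nodup_cons] at h
    simp only [List.foldl_cons, ih _ h.2, List.map_cons, List.mem_cons]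
    by_cases hk : k = ak
    · subst hk
      simp [h.1, PySem.Dict.getD, PySem.Dict.get?_mk_cons]
    · have hne : ak ≠ k := fun h' => hk h'.symm
      by_cases hm : k ∈ t.map Prod.fst
      · simp [hk, hm, PySem.Dict.get?_insert,
          PySem.Dict.getD, PySem.Dict.get?_mk_cons, hne]
      · simp [hk, hm, PySem.Dict.get?_insert]

theorem counts_delta_spec_aux (old_counts : List (String × Int)) (new_counts : List (String × Int))
    (ho : (old_counts.map Prod.fst).Nodup) (hn : (new_counts.map Prod.fst).Nodup) :
    counts_delta old_counts new_counts = counts_delta_alt old_counts new_counts := by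
  unfold counts_delta counts_delta_alt
  set od : PySem.Dict String Int := ⟨old_counts⟩ with hod
  set nd : PySem.Dict String Int := ⟨new_counts⟩ with hnd
  have hkeys_o : od.keys = old_counts.map Prod.fst := rfl
  have hkeys_n : nd.keys = new_counts.map Prod.fst := rfl
  have ho' : od.keys.Nodup := ho
  have hofl : PySem.Set.ofList od.keys = od.keys := PySem.Set.ofList_eq_self_of_nodup od.keys ho'
  -- the key list both sides populate
  set keys : List String := PySem.Set.union (PySem.Set.ofList od.keys) nd.keys with hkeys
  have hkeys_nodup : keys.Nodup := PySem.Set.nodup_union _ _ (by rw [hofl]; exact ho')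
  have hmemkeys : ∀ k, k ∈ keys ↔ k ∈ od.keys ∨ k ∈ nd.keys := by
    intro k
    rw [hkeys, PySem.Set.mem_union, PySem.Set.mem_ofList]
  -- A's side: a fold of fresh inserts from empty
  have hA : (keys.foldl (countsDeltaStepA od nd) PySem.Dict.empty).items
      = keys.map (fun k => (k, valA od nd k)) := by
    have h1 : keys.foldl (countsDeltaStepA od nd) PySem.Dict.empty
        = keys.foldl (fun d k => d.insert k (valA od nd k)) PySem.Dict.empty := by
      apply PySem.List.foldl_congr_mem
      intro d k _; exact stepA_eq_insert od nd d k
    rw [h1]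
    have := PySem.Dict.items_foldl_insert_fresh (l := keys) (k := fun x => x)
      (v := fun x => valA od nd x) (d := PySem.Dict.empty)
      (by intro a _; rfl) (by simpa using hkeys_nodup)
    simpa using this
  -- B's side
  set d0 : PySem.Dict String Int :=
    old_counts.foldl (fun d p => d.insert p.1 (-p.2)) PySem.Dict.empty with hd0
  set dB : PySem.Dict String Int :=
    new_counts.foldl (fun d p => d.insert p.1 (d.getD p.1 0 + p.2)) d0 with hdB
  have hd0keys : d0.keys = old_counts.map Prod.fst := by
    rw [hd0]
    have := PySem.Dict.keys_foldl_insert_key (l := old_counts) (key := Prod.fst)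
      (f := fun d p => -p.2) (d := PySem.Dict.empty)
    rw [this]
    simp [PySem.Dict.keys_empty, PySem.Set.update_nil_left,
      PySem.Set.ofList_eq_self_of_nodup _ ho]
  have hBkeys : dB.keys = keys := by
    rw [hdB]
    have := PySem.Dict.keys_foldl_insert_key (l := new_counts) (key := Prod.fst)
      (f := fun d p => d.getD p.1 0 + p.2) (d := d0)
    rw [this, hd0keys, hkeys, hofl, hkeys_o, hkeys_n]
    rfl
  have hBnodup : dB.keys.Nodup := by rw [hBkeys]; exact hkeys_nodup
  have hitemsB : dB.items = dB.keys.map (fun k => (k, dB.getD k 0)) :=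
    PySem.Dict.items_eq_map_keys dB hBnodup 0
  rw [hA, hitemsB, hBkeys]
  -- pointwise equality of the values at every key of the union
  refine List.map_congr_left ?_
  intro k hk
  have hget0 : d0.get? k =
      if k ∈ old_counts.map Prod.fst then (od.get? k).map (fun v => -v) else none := by
    rw [hd0, get?_foldl_neg old_counts PySem.Dict.empty k ho]
    rfl
  have hgetB : dB.get? k =
      if k ∈ new_counts.map Prod.fst then some (d0.getD k 0 + nd.getD k 0) else d0.get? k := by
    rw [hdB, get?_foldl_acc new_counts d0 k hn]
  have hget_o : od.get? k = none ↔ k ∉ old_counts.map Prod.fst :=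
    PySem.Dict.get?_eq_none_iff_not_mem_keys od k
  have hget_n : nd.get? k = none ↔ k ∉ new_counts.map Prod.fst :=
    PySem.Dict.get?_eq_none_iff_not_mem_keys nd k
  have hun : k ∈ old_counts.map Prod.fst ∨ k ∈ new_counts.map Prod.fst := (hmemkeys k).mp hk
  refine Prod.ext rfl ?_
  show valA od nd k = dB.getD k 0
  unfold valA
  rcases hoo : od.get? k with _ | oc <;> rcases hnn : nd.get? k with _ | nc
  · -- impossible: k is in the key union
    rcases hun with h | h
    · exact absurd h (hget_o.mp hoo)
    · exact absurd h (hget_n.mp hnn)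
  · -- new only
    have hko : k ∉ old_counts.map Prod.fst := hget_o.mp hoo
    have hkn : k ∈ new_counts.map Prod.fst := by
      by_contra h
      rw [hget_n.mpr h] at hnn
      cases hnn
    have hd0v : d0.getD k 0 = 0 := by
      rw [PySem.Dict.getD_eq_get?_getD, hget0, if_neg hko]; rfl
    have hdBv : dB.getD k 0 = d0.getD k 0 + nd.getD k 0 := by
      rw [PySem.Dict.getD_eq_get?_getD, hgetB, if_pos hkn]; rfl
    rw [hdBv, hd0v, zero_add]
  · -- old only
    have hko : k ∈ old_counts.map Prod.fst := by
      by_contra h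
      rw [hget_o.mpr h] at hoo
      cases hoo
    have hkn : k ∉ new_counts.map Prod.fst := hget_n.mp hnn
    have hdBv : dB.getD k 0 = -oc := by
      rw [PySem.Dict.getD_eq_get?_getD, hgetB, if_neg hkn, hget0, if_pos hko, hoo]; rfl
    rw [hdBv]
  · -- both
    have hko : k ∈ old_counts.map Prod.fst := by
      by_contra h
      rw [hget_o.mpr h] at hoo
      cases hoo
    have hkn : k ∈ new_counts.map Prod.fst := by
      by_contra h
      rw [hget_n.mpr h] at hnn
      cases hnn
    have hd0v : d0.getD k 0 = -oc := by
      rw [PySem.Dict.getD_eq_get?_getD, hget0, if_pos hko, hoo]; rfl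
    have hndv : nd.getD k 0 = nc := by
      rw [PySem.Dict.getD_eq_get?_getD, hnn]; rfl
    have hdBv : dB.getD k 0 = d0.getD k 0 + nd.getD k 0 := by
      rw [PySem.Dict.getD_eq_get?_getD, hgetB, if_pos hkn]; rfl
    rw [hdBv, hd0v, hndv]
    ring

-- ===== VERDICT (by name: the statement is the Claim_ definition above) =====
theorem counts_delta_spec : Claim_equal_counts_delta := by
  intro old_counts new_counts _ hpre
  exact counts_delta_spec_aux old_counts new_counts hpre.1 hpre.2
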